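-- pv_equiv track=rewrite | github.com/Soulbeaters/incremental-author-disambiguation | acceptance_package/2_评测模块/evaluate.py | _generate_pairs_from_clusters
-- ===== SOURCE A (Python) =====
-- from typing import Dict, List, Set, Tuple, Any
-- from collections import defaultdict
--
-- def _generate_pairs_from_clusters(clusters_by_mention: Dict[int, str]) -> Set[Tuple[int, int]]:
--     """
--     从cluster mapping生成mention对 / Генерация пар упоминаний из кластеров
--
--     Args:
--         clusters_by_mention: {mention_id: cluster_id}
--
--     Returns:
--         Set of (mention_id1, mention_id2) pairs where mention_id1 < mention_id2
--     """
--     # 反向索引：cluster_id -> [mention_ids]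
--     cluster_to_mentions = defaultdict(list)
--     for mention_id, cluster_id in clusters_by_mention.items():
--         cluster_to_mentions[cluster_id].append(mention_id)
--
--     # 生成所有同cluster内的mention对
--     pairs = set()
--     for cluster_id, mention_ids in cluster_to_mentions.items():
--         # 生成组合 / Генерация комбинаций
--         for i in range(len(mention_ids)):
--             for j in range(i + 1, len(mention_ids)):
--                 m1, m2 = mention_ids[i], mention_ids[j]
--                 # 确保顺序一致（小的在前）/ Обеспечение согласованности порядка
--                 if m1 > m2:
--                     m1, m2 = m2, m1
--                 pairs.add((m1, m2))
--
--     return pairs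
-- ===== SOURCE B (Python) =====
-- def _generate_pairs_from_clusters(clusters_by_mention):
--     """Sort-free run enumeration: distinct clusters in first-seen order, members
--     collected by filtering, pairs emitted by a head/tail sweep with min/max."""
--     items = list(clusters_by_mention.items())
--     clusters = list(dict.fromkeys(c for _, c in items))
--     pairs = set()
--     for c in clusters:
--         ms = [m for m, c2 in items if c2 == c]
--         while ms:
--             m1, ms = ms[0], ms[1:]
--             for m2 in ms:
--                 pairs.add((min(m1, m2), max(m1, m2)))
--     return pairs
-- ===== Notes on version B (the rewrite author's own statement) =====
-- stated objective: alternative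
-- what changed: Replaces the defaultdict reverse index + nested index loops over range() with a scan over distinct cluster ids in first-seen order, per-cluster membership by filtering, and a head/tail sweep emitting (min,max) pairs.
import Mathlib
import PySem

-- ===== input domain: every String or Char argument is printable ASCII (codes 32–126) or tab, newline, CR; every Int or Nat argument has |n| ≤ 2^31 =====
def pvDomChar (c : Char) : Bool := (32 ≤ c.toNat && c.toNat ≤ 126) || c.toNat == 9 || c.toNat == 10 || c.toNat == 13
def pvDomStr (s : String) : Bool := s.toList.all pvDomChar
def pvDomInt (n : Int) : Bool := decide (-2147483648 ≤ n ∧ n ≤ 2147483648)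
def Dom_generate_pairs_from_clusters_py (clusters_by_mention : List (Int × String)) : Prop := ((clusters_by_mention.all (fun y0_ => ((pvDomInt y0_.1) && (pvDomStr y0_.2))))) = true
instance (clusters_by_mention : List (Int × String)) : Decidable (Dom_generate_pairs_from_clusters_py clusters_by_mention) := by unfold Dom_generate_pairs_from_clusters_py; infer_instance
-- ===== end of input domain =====

-- B replaces A's defaultdict reverse index + nested range() index loops by a scan over the
-- distinct cluster ids in first-seen order, per-cluster membership by filtering, and a
-- head/tail sweep emitting (min, max) pairs (alternative decomposition, not claimed faster).

-- ===== PORT A =====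
def generate_pairs_from_clusters_py (clusters_by_mention : List (Int × String)) : List (Int × Int) :=
  -- the Python parameter is a dict[int, str]; its items in insertion order:
  let items := (PySem.Dict.ofList clusters_by_mention).items
  -- cluster_to_mentions = defaultdict(list); for m, c in items: cluster_to_mentions[c].append(m)
  let cluster_to_mentions :=
    items.foldl (fun d p => d.modify p.2 [] (fun l => l ++ [p.1])) PySem.Dict.empty
  -- pairs = set(); for c, mention_ids in cluster_to_mentions.items(): nested index loops
  cluster_to_mentions.items.foldl (fun pairs q =>
    let mention_ids := q.2
    (PySem.List.pyRange 0 (mention_ids.length : Int) 1).foldl (fun pairs i =>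
      (PySem.List.pyRange (i + 1) (mention_ids.length : Int) 1).foldl (fun pairs j =>
        let m1 := PySem.List.pyGetD mention_ids i 0
        let m2 := PySem.List.pyGetD mention_ids j 0
        let mm := if m1 > m2 then (m2, m1) else (m1, m2)
        PySem.Set.add pairs mm) pairs) pairs) PySem.Set.empty

-- ===== PORT B =====
-- while ms: m1, ms = ms[0], ms[1:]; for m2 in ms: pairs.add((min(m1,m2), max(m1,m2)))
def pvSweep (ms : List Int) (pairs : PySem.Set (Int × Int)) : PySem.Set (Int × Int) :=
  match ms with
  | [] => pairs
  | m1 :: rest =>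
    pvSweep rest (rest.foldl (fun pr m2 => PySem.Set.add pr (min m1 m2, max m1 m2)) pairs)

def generate_pairs_from_clusters_py_alt (clusters_by_mention : List (Int × String)) : List (Int × Int) :=
  let items := (PySem.Dict.ofList clusters_by_mention).items
  -- clusters = list(dict.fromkeys(c for _, c in items))
  let clusters := PySem.List.dedup (items.map (fun p => p.2))
  clusters.foldl (fun pairs c =>
    pvSweep ((items.filter (fun p => p.2 == c)).map (fun p => p.1)) pairs) PySem.Set.empty

-- ===== PRECONDITION & SPEC =====
def Spec_generate_pairs_from_clusters_py (clusters_by_mention : List (Int × String)) (out : List (Int × Int)) : Prop := out = generate_pairs_from_clusters_py_alt clusters_by_mention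
instance (clusters_by_mention : List (Int × String)) (out : List (Int × Int)) : Decidable (Spec_generate_pairs_from_clusters_py clusters_by_mention out) := by unfold Spec_generate_pairs_from_clusters_py; infer_instance

-- ===== CLAIM (what is proved, stated in full; the proofs are below) =====
def Claim_equal_generate_pairs_from_clusters_py : Prop := ∀ (clusters_by_mention : List (Int × String)), Dom_generate_pairs_from_clusters_py clusters_by_mention → Spec_generate_pairs_from_clusters_py clusters_by_mention (generate_pairs_from_clusters_py clusters_by_mention)

-- ===== LEMMAS AND PROOFS =====

-- A's 'if m1 > m2 then swap' canonicalisation is B's (min, max)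
theorem pv_canon_eq (m1 m2 : Int) :
    (if m1 > m2 then (m2, m1) else (m1, m2)) = (min m1 m2, max m1 m2) := by
  by_cases h : m1 > m2 <;> simp [min_def, max_def, h]

-- Nat-indexed form of A's nested loops over one cluster's member list = B's sweep
theorem pv_nat_eq (ms : List Int) (pairs : PySem.Set (Int × Int)) :
    (List.range ms.length).foldl (fun pr k =>
      (ms.drop (k+1)).foldl (fun pr m2 =>
        PySem.Set.add pr (min (ms.getD k 0) m2, max (ms.getD k 0) m2)) pr) pairs
    = pvSweep ms pairs := by
  induction ms generalizing pairs with
  | nil => simp [pvSweep]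
  | cons m rest ih =>
    rw [show (m :: rest).length = rest.length + 1 from rfl, List.range_succ_eq_map]
    simp only [List.foldl_cons, List.foldl_map, List.drop_succ_cons, List.getD_cons_succ,
      List.getD_cons_zero, List.drop_zero]
    rw [ih]
    rfl

-- A's nested range() index loops over one cluster's member list = B's head/tail sweep
theorem pv_inner_eq (ms : List Int) (pairs : PySem.Set (Int × Int)) :
    (PySem.List.pyRange 0 (ms.length : Int) 1).foldl (fun pairs i =>
      (PySem.List.pyRange (i + 1) (ms.length : Int) 1).foldl (fun pairs j =>
        let m1 := PySem.List.pyGetD ms i 0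
        let m2 := PySem.List.pyGetD ms j 0
        let mm := if m1 > m2 then (m2, m1) else (m1, m2)
        PySem.Set.add pairs mm) pairs) pairs
    = pvSweep ms pairs := by
  rw [PySem.List.pyRange_one]
  simp only [Int.sub_zero, Int.toNat_natCast, List.foldl_map, Int.zero_add]
  rw [← pv_nat_eq ms pairs]
  congr 1
  funext pr k
  simp only [pv_canon_eq]
  rw [PySem.List.foldl_pyRange_pyGetD' ms 0
        (fun pr m2 => PySem.Set.add pr (min (PySem.List.pyGetD ms (k : Int) 0) m2,
                                        max (PySem.List.pyGetD ms (k : Int) 0) m2))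
        pr (by omega : (0:Int) ≤ (k:Int)+1)]
  simp only [PySem.List.pyGetD_natCast]
  norm_num

theorem pv_main (cbm : List (Int × String)) :
    generate_pairs_from_clusters_py cbm = generate_pairs_from_clusters_py_alt cbm := by
  unfold generate_pairs_from_clusters_py generate_pairs_from_clusters_py_alt
  simp only []
  set items := (PySem.Dict.ofList cbm).items with hitems
  set d2 := items.foldl (fun d p => d.modify p.2 [] (fun l => l ++ [p.1])) PySem.Dict.empty with hd2
  have hnd : d2.keys.Nodup := by
    rw [hd2]
    exact PySem.Dict.nodup_keys_foldl_modify_key items (fun p => p.2) []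
      (fun _ p => fun l => l ++ [p.1]) PySem.Dict.empty (by simp [PySem.Dict.keys_empty])
  have hkeys : d2.keys = PySem.List.dedup (items.map (fun p => p.2)) := by
    rw [hd2, PySem.Dict.keys_foldl_modify_key]
    simp [PySem.Set.update_nil_left]
  have hget : ∀ c, d2.getD c [] = (items.filter (fun p => p.2 == c)).map (fun p => p.1) := by
    intro c
    rw [hd2, show items.foldl (fun d p => d.modify p.2 [] (fun l => l ++ [p.1])) PySem.Dict.empty
          = (items.map Prod.swap).foldl (fun d q => d.modify q.1 [] (fun l => l ++ [q.2]))
              PySem.Dict.empty from (List.foldl_map (f := Prod.swap)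
            (g := fun d q => d.modify q.1 [] (fun l => l ++ [q.2])) (l := items)
            (init := PySem.Dict.empty)).symm,
        PySem.Dict.getD_foldl_modify_append]
    simp only [PySem.Dict.getD_empty, List.nil_append, List.filter_map, List.map_map]
    rfl
  have hitems2 : d2.items = (PySem.List.dedup (items.map (fun p => p.2))).map
      (fun c => (c, (items.filter (fun p => p.2 == c)).map (fun p => p.1))) := by
    rw [PySem.Dict.items_eq_map_keys d2 hnd [], hkeys]
    exact List.map_congr_left (fun c _ => by rw [hget c])
  rw [hitems2, List.foldl_map]
  congr 1
  funext pr c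
  exact pv_inner_eq _ pr

-- ===== VERDICT (by name: the statement is the Claim_ definition above) =====
theorem generate_pairs_from_clusters_py_spec : Claim_equal_generate_pairs_from_clusters_py := by
  intro cbm _
  unfold Spec_generate_pairs_from_clusters_py
  exact pv_main cbm
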